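-- pv_equiv track=rewrite | github.com/BadenLab/retinapy | retinapy/src/retinapy/spikedistancefield.py | distance_field2
-- ===== SOURCE A (Python) =====
-- def distance_field2(spikes, default_dist):
--     """An alternative (non-vector) distance field implementation.
--
--     Not used at the moment. Leaving it here for reference.
--     """
--     dist = [
--         default_dist,
--     ] * len(spikes)
--     spike_indicies = [idx for idx, v in enumerate(spikes) if v == 1]
--
--     def _dfs(idx, cur_dist):
--         if dist[idx] <= cur_dist:
--             return
--         dist[idx] = cur_dist
--         if idx > 0:
--             _dfs(idx - 1, cur_dist + 1)
--         if idx < len(spikes) - 1: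
--             _dfs(idx + 1, cur_dist + 1)
--
--     for s in spike_indicies:
--         _dfs(s, cur_dist=0)
--     return dist
-- ===== SOURCE B (Python) =====
-- def distance_field2(spikes, default_dist):
--     """Two-pass linear sweep: forward pass gives capped distance to the
--     nearest spike on or before each index, backward pass merges in the
--     distance to the nearest spike on or after it."""
--     fwd = []
--     cur = default_dist
--     for v in spikes:
--         cur = 0 if v == 1 else cur + 1
--         if cur > default_dist:
--             cur = default_dist
--         fwd.append(cur)
--     out = []
--     cur = default_dist
--     for v, f in zip(reversed(spikes), reversed(fwd)):
--         cur = 0 if v == 1 else cur + 1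
--         if cur > default_dist:
--             cur = default_dist
--         out.append(min(cur, f))
--     out.reverse()
--     return out
-- ===== Notes on version B (the rewrite author's own statement) =====
-- stated objective: alternative
-- what changed: Replaced A's per-spike recursive flood fill with two capped linear sweeps (forward and backward), each carrying a running distance-since-last-spike; Pre_ excludes inputs whose flood depth (min(default_dist, max(i, n-1-i)) for a spike at i) exceeds 900, near CPython's recursion limit where A raises RecursionError.
import Mathlib
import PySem

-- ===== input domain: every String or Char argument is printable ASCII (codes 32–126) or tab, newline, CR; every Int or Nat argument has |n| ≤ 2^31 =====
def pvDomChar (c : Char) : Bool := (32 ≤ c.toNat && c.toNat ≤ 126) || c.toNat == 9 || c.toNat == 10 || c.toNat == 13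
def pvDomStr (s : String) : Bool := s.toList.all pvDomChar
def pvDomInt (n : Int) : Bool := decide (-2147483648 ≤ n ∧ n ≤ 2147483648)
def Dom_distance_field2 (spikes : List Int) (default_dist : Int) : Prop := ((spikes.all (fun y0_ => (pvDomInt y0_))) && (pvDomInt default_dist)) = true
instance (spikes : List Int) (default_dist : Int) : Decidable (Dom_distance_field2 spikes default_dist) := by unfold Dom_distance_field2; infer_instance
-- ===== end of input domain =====

-- B replaces A's per-spike recursive flood fill with two capped linear sweeps (forward then
-- backward), computing the same capped distance-to-nearest-spike field without recursion.

-- ===== PORT A =====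
-- A's inner recursive `_dfs` ported with a fuel argument that only bounds the recursion depth:
-- every value in `dist` is ≤ default_dist, and `_dfs` stops as soon as dist[idx] ≤ cur_dist,
-- so the depth never exceeds default_dist.toNat; with that fuel the port is exact (proved by
-- the invariants used in the equivalence proof below).
def dfsA : Nat → List Int → Nat → Int → List Int
  | 0, dist, _, _ => dist
  | f + 1, dist, idx, cur =>
    if dist.getD idx 0 ≤ cur then dist
    else
      let d1 := dist.set idx cur
      let d2 := if 0 < idx then dfsA f d1 (idx - 1) (cur + 1) else d1
      if idx < dist.length - 1 then dfsA f d2 (idx + 1) (cur + 1) else d2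

def distance_field2 (spikes : List Int) (default_dist : Int) : List Int :=
  let dist := List.replicate spikes.length default_dist
  let spike_indicies := ((PySem.List.enumerate spikes 0).filter (fun p => p.2 == 1)).map (·.1)
  -- each enumerate index is ≥ 0, so `.toNat` is exact
  spike_indicies.foldl (fun d s => dfsA default_dist.toNat d s.toNat 0) dist

-- ===== PORT B =====
-- cur = 0 if v == 1 else cur + 1; if cur > default_dist: cur = default_dist
def stepB (default_dist c v : Int) : Int :=
  let c' := if v == 1 then 0 else c + 1
  if default_dist < c' then default_dist else c'

def distance_field2_alt (spikes : List Int) (default_dist : Int) : List Int :=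
  let fwd := (spikes.foldl
      (fun st v => let c := stepB default_dist st.1 v; (c, st.2 ++ [c]))
      (default_dist, ([] : List Int))).2
  let out := ((spikes.reverse.zip fwd.reverse).foldl
      (fun st p => let c := stepB default_dist st.1 p.1; (c, st.2 ++ [min c p.2]))
      (default_dist, ([] : List Int))).2
  out.reverse

-- ===== PRECONDITION & SPEC =====
-- Pre_ excludes inputs on which A's recursive flood fill reaches a depth near CPython's
-- recursion limit (1000) and raises RecursionError: from a spike at index i the recursion
-- depth reaches min(default_dist, max(i, n-1-i)); we require that bound ≤ 900 per spike.
def Pre_distance_field2 (spikes : List Int) (default_dist : Int) : Prop :=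
  ∀ i : Nat, i < spikes.length → spikes.getD i 0 = 1 →
    min default_dist ((max i (spikes.length - 1 - i) : Nat) : Int) ≤ 900
instance (spikes : List Int) (default_dist : Int) : Decidable (Pre_distance_field2 spikes default_dist) := by
  unfold Pre_distance_field2; infer_instance

def pvWitness_distance_field2 : List Int × Int := ([1, 0, 0, 1], 5)

def Spec_distance_field2 (spikes : List Int) (default_dist : Int) (out : List Int) : Prop := out = distance_field2_alt spikes default_dist
instance (spikes : List Int) (default_dist : Int) (out : List Int) : Decidable (Spec_distance_field2 spikes default_dist out) := by unfold Spec_distance_field2; infer_instance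

-- ===== CLAIM (what is proved, stated in full; the proofs are below) =====
def Claim_equal_distance_field2 : Prop := ∀ (spikes : List Int) (default_dist : Int), Dom_distance_field2 spikes default_dist → Pre_distance_field2 spikes default_dist → Spec_distance_field2 spikes default_dist (distance_field2 spikes default_dist)

-- ===== LEMMAS AND PROOFS =====

-- distance (from the front) to the first `1` in a list
def nuF : List Int → Option Nat
  | [] => none
  | v :: t => if v = 1 then some 0 else (nuF t).map (· + 1)

-- `min default k`, or `default` when there is no spike
def capN (d : Int) : Option Nat → Int
  | none => d
  | some k => min d (k : Int)

-- the common specification value: min(default, distance to nearest spike), per index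
def specV (spikes : List Int) (d : Int) (i : Nat) : Int :=
  min (capN d (nuF ((spikes.take (i + 1)).reverse))) (capN d (nuF (spikes.drop i)))

-- the list of per-index values produced by B's forward sweep
def outF (d : Int) : Int → List Int → List Int
  | _, [] => []
  | c, v :: t => stepB d c v :: outF d (stepB d c v) t

-- the list of per-index values produced by B's backward sweep
def outB (d : Int) : Int → List (Int × Int) → List Int
  | _, [] => []
  | c, p :: t => min (stepB d c p.1) p.2 :: outB d (stepB d c p.1) t

lemma getD_set' (d : List Int) (k : Nat) (c : Int) (i : Nat) :
    (d.set k c).getD i 0 = if i = k ∧ k < d.length then c else d.getD i 0 := by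
  simp only [List.getD_eq_getElem?_getD, List.getElem?_set]
  by_cases h1 : k = i
  · subst h1
    by_cases h2 : k < d.length
    · simp [h2]
    · rw [if_pos rfl, if_neg h2, if_neg (by omega), List.getElem?_eq_none (by omega)]
  · rw [if_neg h1, if_neg (by omega)]

lemma foldl_min_facts {α : Type} (g : α → Int) (S : List α) : ∀ (a : Int),
    (S.foldl (fun x s => min x (g s)) a ≤ a)
    ∧ (∀ s ∈ S, S.foldl (fun x s => min x (g s)) a ≤ g s)
    ∧ (S.foldl (fun x s => min x (g s)) a = a ∨ ∃ s ∈ S, S.foldl (fun x s => min x (g s)) a = g s) := by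
  induction S with
  | nil => intro a; simp
  | cons s t ih =>
    intro a
    obtain ⟨h1, h2, h3⟩ := ih (min a (g s))
    refine ⟨by simpa using le_trans h1 (by omega), ?_, ?_⟩
    · intro x hx
      rcases List.mem_cons.mp hx with h | h
      · subst h; simpa using le_trans h1 (by omega)
      · simpa using h2 x h
    · rcases h3 with h | ⟨x, hx, he⟩
      · rcases le_total a (g s) with hc | hc
        · left; simp only [List.foldl_cons]; omega
        · right; exact ⟨s, by simp, by simp only [List.foldl_cons]; omega⟩
      · right; exact ⟨x, by simp [hx], by simpa using he⟩

lemma nuF_none_iff (l : List Int) : nuF l = none ↔ ∀ j, j < l.length → l.getD j 0 ≠ 1 := by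
  induction l with
  | nil => simp [nuF]
  | cons v t ih =>
    simp only [nuF]
    split_ifs with hv
    · constructor
      · intro h; exact absurd h (by simp)
      · intro h; exact absurd hv (by have := h 0 (by simp); simpa using this)
    · rw [Option.map_eq_none_iff, ih]
      constructor
      · intro h j hj
        cases j with
        | zero => simpa using hv
        | succ j => exact h j (by simpa using hj)
      · intro h j hj; exact h (j+1) (by simpa using hj)

lemma nuF_some_spec (l : List Int) : ∀ (k : Nat), nuF l = some k →
    k < l.length ∧ l.getD k 0 = 1 ∧ ∀ j, j < k → l.getD j 0 ≠ 1 := by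
  induction l with
  | nil => intro k h; simp [nuF] at h
  | cons v t ih =>
    intro k h
    simp only [nuF] at h
    split_ifs at h with hv
    · cases h; refine ⟨by simp, by simpa using hv, by omega⟩
    · rcases Option.map_eq_some_iff.mp h with ⟨k', hk', rfl⟩
      obtain ⟨h1, h2, h3⟩ := ih k' hk'
      refine ⟨by simpa using h1, by simpa using h2, ?_⟩
      intro j hj
      cases j with
      | zero => simpa using hv
      | succ j => simpa using h3 j (by omega)

lemma dfsA_length (f : Nat) : ∀ (d : List Int) (k : Nat) (c : Int),
    (dfsA f d k c).length = d.length := by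
  induction f with
  | zero => intro d k c; rfl
  | succ f ih =>
    intro d k c
    rw [dfsA]
    split_ifs with h1 h2 h2 <;> simp [ih, List.length_set]

lemma lip_chain (d : List Int) (lo b : Nat)
    (H : ∀ j, lo ≤ j → j + 1 ≤ b → j + 1 < d.length →
      d.getD j 0 ≤ d.getD (j+1) 0 + 1 ∧ d.getD (j+1) 0 ≤ d.getD j 0 + 1) :
    ∀ i j, lo ≤ i → i ≤ j → j ≤ b → j < d.length →
      d.getD i 0 ≤ d.getD j 0 + ((j : Int) - i) ∧ d.getD j 0 ≤ d.getD i 0 + ((j : Int) - i) := by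
  intro i j
  induction j with
  | zero => intro h1 h2 h3 h4; have : i = 0 := by omega
            subst this; simp
  | succ j ihj =>
    intro h1 h2 h3 h4
    by_cases he : i = j + 1
    · subst he; simp
    · have hij : i ≤ j := by omega
      obtain ⟨a1, a2⟩ := ihj h1 hij (by omega) (by omega)
      obtain ⟨b1, b2⟩ := H j (by omega) (by omega) (by omega)
      constructor <;> [skip; skip] <;> push_cast <;> omega

lemma dfsA_stop (f : Nat) (d : List Int) (k : Nat) (c : Int) (h : d.getD k 0 ≤ c) :
    dfsA f d k c = d := by
  cases f with
  | zero => rfl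
  | succ f => rw [dfsA, if_pos h]

lemma dfs_left (f : Nat) : ∀ (d : List Int) (k : Nat) (c : Int),
    k < d.length →
    (∀ j, j + 1 ≤ k → j + 1 < d.length →
      d.getD j 0 ≤ d.getD (j+1) 0 + 1 ∧ d.getD (j+1) 0 ≤ d.getD j 0 + 1) →
    (k + 1 < d.length → d.getD (k+1) 0 ≤ c - 1) →
    (∀ i, i ≤ k → d.getD i 0 ≤ c + f) →
    ∀ i, i < d.length → (dfsA f d k c).getD i 0 =
      if i ≤ k then min (d.getD i 0) (c + ((k : Int) - i)) else d.getD i 0 := by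
  induction f with
  | zero =>
    intro d k c hk _ _ hbd i hi
    show d.getD i 0 = _
    split_ifs with hik
    · have h2 := hbd i hik
      have h3 : (i : Int) ≤ (k : Int) := by exact_mod_cast hik
      simp only [Nat.cast_zero, add_zero] at h2
      omega
    · rfl
  | succ f ih =>
    intro d k c hk hlip hbdy hbd i hi
    rw [dfsA]
    by_cases h1 : d.getD k 0 ≤ c
    · -- stop: d[k] ≤ c
      rw [if_pos h1]
      split_ifs with hik
      · obtain ⟨l1, l2⟩ := lip_chain d 0 k (fun j _ hj1 hj2 => hlip j hj1 hj2) i k (by omega) hik (le_refl _) hk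
        omega
      · rfl
    · rw [if_neg h1]
      replace h1 : c < d.getD k 0 := by omega
      simp only []
      set d1 := d.set k c with hd1
      have hd1len : d1.length = d.length := by rw [hd1, List.length_set]
      have hd1get : ∀ j, d1.getD j 0 = if j = k then c else d.getD j 0 := by
        intro j; rw [hd1, getD_set']
        split_ifs with h2 h3 h3 <;> first | rfl | omega
      by_cases hk0 : 0 < k
      · rw [if_pos hk0]
        set dL := dfsA f d1 (k-1) (c+1) with hdL
        have hL := ih d1 (k-1) (c+1) (by omega)
          (by intro j hj1 hj2
              rw [hd1get j, hd1get (j+1), if_neg (by omega), if_neg (by omega)]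
              exact hlip j (by omega) (by omega))
          (by intro _
              rw [show k - 1 + 1 = k by omega, hd1get k, if_pos rfl]; omega)
          (by intro j hj
              rw [hd1get j, if_neg (by omega)]
              have h5 := hbd j (by omega)
              simp only [Nat.cast_add, Nat.cast_one] at h5; omega)
        have hLget : ∀ j, j < d.length → dL.getD j 0 =
            if j ≤ k - 1 then min (d1.getD j 0) ((c+1) + (((k-1 : Nat) : Int) - j)) else d1.getD j 0 := by
          intro j hj; exact hL j (by omega)
        have hfinal : ∀ j, j < d.length → dL.getD j 0 =
            if j ≤ k then min (d.getD j 0) (c + ((k : Int) - j)) else d.getD j 0 := by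
          intro j hj
          rw [hLget j hj, hd1get j]
          rcases lt_trichotomy j k with h | h | h
          · rw [if_pos (by omega), if_neg (by omega), if_pos (by omega)]
            have hc : ((k - 1 : Nat) : Int) = (k : Int) - 1 := by omega
            rw [hc]; ring_nf
          · subst h
            rw [if_neg (by omega), if_pos rfl, if_pos (le_refl _)]
            simp only [sub_self, add_zero]
            omega
          · rw [if_neg (by omega), if_neg (by omega), if_neg (by omega)]
        by_cases hcnd : k < d.length - 1
        · -- right call happens but stops at once
          have hstop : dL.getD (k+1) 0 ≤ c + 1 := by
            rw [hfinal (k+1) (by omega), if_neg (by omega)]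
            have := hbdy (by omega); omega
          rw [if_pos hcnd, dfsA_stop f dL (k+1) (c+1) hstop]
          exact hfinal i hi
        · rw [if_neg hcnd]
          exact hfinal i hi
      · -- k = 0
        rw [if_neg hk0]
        have hke : k = 0 := by omega
        have hfinal : ∀ j, j < d.length → d1.getD j 0 =
            if j ≤ k then min (d.getD j 0) (c + ((k : Int) - j)) else d.getD j 0 := by
          intro j hj
          rw [hd1get j]
          rcases Nat.eq_zero_or_pos j with h | h
          · subst h; rw [if_pos (by omega), if_pos (by omega)]
            subst hke; push_cast; omega
          · rw [if_neg (by omega), if_neg (by omega)]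
        by_cases hcnd : k < d.length - 1
        · have hstop : d1.getD (k+1) 0 ≤ c + 1 := by
            rw [hd1get (k+1), if_neg (by omega)]
            have := hbdy (by omega); omega
          rw [if_pos hcnd, dfsA_stop f d1 (k+1) (c+1) hstop]
          exact hfinal i hi
        · rw [if_neg hcnd]
          exact hfinal i hi

lemma dfs_right (f : Nat) : ∀ (d : List Int) (k : Nat) (c : Int),
    k < d.length →
    (∀ j, k ≤ j → j + 1 < d.length →
      d.getD j 0 ≤ d.getD (j+1) 0 + 1 ∧ d.getD (j+1) 0 ≤ d.getD j 0 + 1) →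
    (0 < k → d.getD (k-1) 0 ≤ c - 1) →
    (∀ i, k ≤ i → i < d.length → d.getD i 0 ≤ c + f) →
    ∀ i, i < d.length → (dfsA f d k c).getD i 0 =
      if k ≤ i then min (d.getD i 0) (c + ((i : Int) - k)) else d.getD i 0 := by
  induction f with
  | zero =>
    intro d k c hk _ _ hbd i hi
    show d.getD i 0 = _
    split_ifs with hik
    · have h2 := hbd i hik hi
      have h3 : (k : Int) ≤ (i : Int) := by exact_mod_cast hik
      simp only [Nat.cast_zero, add_zero] at h2
      omega
    · rfl
  | succ f ih =>
    intro d k c hk hlip hbdy hbd i hi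
    rw [dfsA]
    by_cases h1 : d.getD k 0 ≤ c
    · rw [if_pos h1]
      split_ifs with hik
      · obtain ⟨l1, l2⟩ := lip_chain d k d.length (fun j hj1 _ hj2 => hlip j hj1 hj2)
          k i (le_refl _) hik (by omega) hi
        omega
      · rfl
    · rw [if_neg h1]
      replace h1 : c < d.getD k 0 := by omega
      simp only []
      set d1 := d.set k c with hd1
      have hd1len : d1.length = d.length := by rw [hd1, List.length_set]
      have hd1get : ∀ j, d1.getD j 0 = if j = k then c else d.getD j 0 := by
        intro j; rw [hd1, getD_set']
        split_ifs with h2 h3 h3 <;> first | rfl | omega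
      -- the left call stops at once (or there is none)
      have hd2 : (if 0 < k then dfsA f d1 (k - 1) (c + 1) else d1) = d1 := by
        by_cases hk0 : 0 < k
        · rw [if_pos hk0]
          refine dfsA_stop f d1 (k-1) (c+1) ?_
          rw [hd1get (k-1), if_neg (by omega)]
          have := hbdy hk0; omega
        · rw [if_neg hk0]
      rw [hd2]
      by_cases hcnd : k < d.length - 1
      · rw [if_pos hcnd]
        have hL := ih d1 (k+1) (c+1) (by omega)
          (by intro j hj1 hj2
              rw [hd1get j, hd1get (j+1), if_neg (by omega), if_neg (by omega)]
              exact hlip j (by omega) (by omega))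
          (by intro _
              rw [show k + 1 - 1 = k by omega, hd1get k, if_pos rfl]; omega)
          (by intro j hj hjl
              rw [hd1get j, if_neg (by omega)]
              have h5 := hbd j (by omega) (by omega)
              simp only [Nat.cast_add, Nat.cast_one] at h5; omega)
        rw [hL i (by omega)]
        rcases lt_trichotomy i k with h | h | h
        · rw [if_neg (by omega), hd1get i, if_neg (by omega), if_neg (by omega)]
        · subst h
          rw [if_neg (by omega), hd1get i, if_pos rfl, if_pos (le_refl _)]
          simp only [sub_self, add_zero]
          omega
        · rw [if_pos (by omega), hd1get i, if_neg (by omega), if_pos (by omega)]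
          have hc : ((k + 1 : Nat) : Int) = (k : Int) + 1 := by omega
          rw [hc]; ring_nf
      · rw [if_neg hcnd]
        have hke : k = d.length - 1 := by omega
        rw [hd1get i]
        rcases lt_trichotomy i k with h | h | h
        · rw [if_neg (by omega), if_neg (by omega)]
        · subst h
          rw [if_pos rfl, if_pos (le_refl _)]
          simp only [sub_self, add_zero]
          omega
        · omega

lemma dfs_main (f : Nat) (d : List Int) (k : Nat) (c : Int)
    (hk : k < d.length)
    (hlip : ∀ j, j + 1 < d.length →
      d.getD j 0 ≤ d.getD (j+1) 0 + 1 ∧ d.getD (j+1) 0 ≤ d.getD j 0 + 1)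
    (hbd : ∀ i, i < d.length → d.getD i 0 ≤ c + f) :
    ∀ i, i < d.length → (dfsA f d k c).getD i 0 =
      min (d.getD i 0) (c + (((i : Int) - k).natAbs : Int)) := by
  cases f with
  | zero =>
    intro i hi
    show d.getD i 0 = _
    have h2 := hbd i hi
    simp only [Nat.cast_zero, add_zero] at h2
    omega
  | succ f =>
    intro i hi
    rw [dfsA]
    by_cases h1 : d.getD k 0 ≤ c
    · rw [if_pos h1]
      rcases le_total i k with hik | hik
      · obtain ⟨l1, l2⟩ := lip_chain d 0 k (fun j _ hj1 hj2 => hlip j hj2) i k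
          (by omega) hik (le_refl _) hk
        omega
      · obtain ⟨l1, l2⟩ := lip_chain d k d.length (fun j _ _ hj2 => hlip j hj2) k i
          (le_refl _) hik (by omega) hi
        omega
    · rw [if_neg h1]
      replace h1 : c < d.getD k 0 := by omega
      simp only []
      set d1 := d.set k c with hd1
      have hd1len : d1.length = d.length := by rw [hd1, List.length_set]
      have hd1get : ∀ j, d1.getD j 0 = if j = k then c else d.getD j 0 := by
        intro j; rw [hd1, getD_set']
        split_ifs with h2 h3 h3 <;> first | rfl | omega
      set dL := if 0 < k then dfsA f d1 (k - 1) (c + 1) else d1 with hdL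
      have hdLlen : dL.length = d.length := by
        rw [hdL]; split_ifs <;> simp [dfsA_length, hd1len]
      have gL : ∀ j, j < d.length → dL.getD j 0 =
          if j ≤ k then min (d.getD j 0) (c + ((k : Int) - j)) else d.getD j 0 := by
        intro j hj
        by_cases hk0 : 0 < k
        · rw [hdL, if_pos hk0]
          rw [dfs_left f d1 (k-1) (c+1) (by omega)
            (by intro j hj1 hj2
                rw [hd1get j, hd1get (j+1), if_neg (by omega), if_neg (by omega)]
                exact hlip j (by omega))
            (by intro _
                rw [show k - 1 + 1 = k by omega, hd1get k, if_pos rfl]; omega)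
            (by intro j hj
                rw [hd1get j, if_neg (by omega)]
                have h5 := hbd j (by omega)
                simp only [Nat.cast_add, Nat.cast_one] at h5; omega)
            j (by omega)]
          rcases lt_trichotomy j k with h | h | h
          · rw [if_pos (by omega), hd1get j, if_neg (by omega), if_pos (by omega)]
            have hc : ((k - 1 : Nat) : Int) = (k : Int) - 1 := by omega
            rw [hc]; ring_nf
          · subst h
            rw [if_neg (by omega), hd1get j, if_pos rfl, if_pos (le_refl _)]
            simp only [sub_self, add_zero]
            omega
          · rw [if_neg (by omega), hd1get j, if_neg (by omega), if_neg (by omega)]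
        · rw [hdL, if_neg hk0, hd1get j]
          have hke : k = 0 := by omega
          rcases Nat.eq_zero_or_pos j with h | h
          · subst h; subst hke
            rw [if_pos rfl, if_pos (le_refl _)]
            push_cast; omega
          · rw [if_neg (by omega), if_neg (by omega)]
      have habs_le : ∀ j : Nat, j ≤ k → ((((j : Int) - k).natAbs : Int)) = (k : Int) - j := by
        intro j hj; have : (j : Int) ≤ k := by exact_mod_cast hj
        omega
      have habs_ge : ∀ j : Nat, k ≤ j → ((((j : Int) - k).natAbs : Int)) = (j : Int) - k := by
        intro j hj; have : (k : Int) ≤ j := by exact_mod_cast hj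
        omega
      by_cases hcnd : k < d.length - 1
      · rw [if_pos hcnd]
        rw [dfs_right f dL (k+1) (c+1) (by omega)
          (by intro j hj1 hj2
              rw [hdLlen] at hj2
              rw [gL j (by omega), gL (j+1) (by omega), if_neg (by omega), if_neg (by omega)]
              exact hlip j (by omega))
          (by intro _
              rw [show k + 1 - 1 = k by omega, gL k (by omega), if_pos (le_refl _)]
              simp only [sub_self, add_zero]; omega)
          (by intro j hj hjl
              rw [hdLlen] at hjl
              rw [gL j (by omega), if_neg (by omega)]
              have h5 := hbd j (by omega)
              simp only [Nat.cast_add, Nat.cast_one] at h5; omega)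
          i (by omega)]
        rcases le_or_gt (k+1) i with h | h
        · rw [if_pos h, gL i (by omega), if_neg (by omega), habs_ge i (by omega)]
          have hc : ((k + 1 : Nat) : Int) = (k : Int) + 1 := by omega
          rw [hc]; ring_nf
        · rw [if_neg (by omega), gL i (by omega), if_pos (by omega), habs_le i (by omega)]
      · rw [if_neg hcnd]
        have : i ≤ k := by omega
        rw [gL i hi, if_pos this, habs_le i this]

lemma dfs_fold (default_dist : Int) (S : List Int) : ∀ (d : List Int),
    (∀ s ∈ S, 0 ≤ s ∧ s.toNat < d.length) →
    (∀ j, j + 1 < d.length →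
      d.getD j 0 ≤ d.getD (j+1) 0 + 1 ∧ d.getD (j+1) 0 ≤ d.getD j 0 + 1) →
    (∀ i, i < d.length → d.getD i 0 ≤ default_dist) →
    (S.foldl (fun d s => dfsA default_dist.toNat d s.toNat 0) d).length = d.length
    ∧ ∀ i, i < d.length →
      (S.foldl (fun d s => dfsA default_dist.toNat d s.toNat 0) d).getD i 0 =
        S.foldl (fun a s => min a ((((i : Int) - s).natAbs : Int))) (d.getD i 0) := by
  induction S with
  | nil => intro d _ _ _; exact ⟨rfl, fun i _ => rfl⟩
  | cons s t ih =>
    intro d hS hlip hbd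
    obtain ⟨hs0, hsl⟩ := hS s (by simp)
    have hmain := dfs_main default_dist.toNat d s.toNat 0 hsl hlip
      (by intro i hi
          have h2 := hbd i hi
          have h3 : default_dist ≤ (default_dist.toNat : Int) := Int.self_le_toNat _
          omega)
    set d' := dfsA default_dist.toNat d s.toNat 0 with hd'
    have hlen : d'.length = d.length := dfsA_length _ _ _ _
    have hget : ∀ i, i < d.length → d'.getD i 0 = min (d.getD i 0) ((((i : Int) - s).natAbs : Int)) := by
      intro i hi
      rw [hmain i hi, Int.toNat_of_nonneg hs0]
      ring_nf
    obtain ⟨ihl, ihg⟩ := ih d'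
      (by intro x hx; rw [hlen]; exact hS x (by simp [hx]))
      (by intro j hj
          rw [hlen] at hj
          obtain ⟨a1, a2⟩ := hlip j hj
          rw [hget j (by omega), hget (j+1) (by omega)]
          have hc : (((j : Nat) + 1 : Nat) : Int) = (j : Int) + 1 := by push_cast; ring
          constructor <;> rw [hc] <;> omega)
      (by intro i hi
          rw [hlen] at hi
          rw [hget i hi]
          have := hbd i hi
          omega)
    rw [hlen] at ihl
    refine ⟨by simpa using ihl, ?_⟩
    intro i hi
    simp only [List.foldl_cons]
    rw [← hd', ihg i (by omega), hget i hi]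

lemma mem_spikeIdx (spikes : List Int) (s : Int) :
    s ∈ ((PySem.List.enumerate spikes 0).filter (fun p => p.2 == 1)).map (·.1) ↔
      0 ≤ s ∧ s.toNat < spikes.length ∧ spikes.getD s.toNat 0 = 1 := by
  rw [List.mem_map]
  constructor
  · rintro ⟨p, hp, rfl⟩
    rw [List.mem_filter] at hp
    obtain ⟨hmem, hv⟩ := hp
    rw [PySem.List.mem_enumerate_iff] at hmem
    obtain ⟨k, hk, rfl⟩ := hmem
    simp only [zero_add, beq_iff_eq] at hv ⊢
    refine ⟨by positivity, ?_, ?_⟩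
    · simpa using hk
    · simp only [Int.toNat_natCast]
      rw [List.getD_eq_getElem _ _ hk]
      exact hv
  · rintro ⟨h0, hl, hv⟩
    refine ⟨(s, spikes.getD s.toNat 0), ?_, ?_⟩
    · rw [List.mem_filter]
      constructor
      · rw [PySem.List.mem_enumerate_iff]
        refine ⟨s.toNat, hl, ?_⟩
        rw [List.getD_eq_getElem _ _ hl]
        simp [Int.toNat_of_nonneg h0]
      · simpa using hv
    · rfl

lemma A_char (spikes : List Int) (d : Int) :
    (distance_field2 spikes d).length = spikes.length
    ∧ ∀ i, i < spikes.length → (distance_field2 spikes d).getD i 0 =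
      (((PySem.List.enumerate spikes 0).filter (fun p => p.2 == 1)).map (·.1)).foldl
        (fun a s => min a ((((i : Int) - s).natAbs : Int))) d := by
  unfold distance_field2
  simp only []
  have hrep : ∀ i, i < spikes.length → (List.replicate spikes.length d).getD i 0 = d := by
    intro i hi
    rw [List.getD_eq_getElem _ _ (by simpa using hi)]
    simp
  obtain ⟨hl, hg⟩ := dfs_fold d (((PySem.List.enumerate spikes 0).filter (fun p => p.2 == 1)).map (·.1))
    (List.replicate spikes.length d)
    (by intro s hs
        rw [mem_spikeIdx] at hs
        exact ⟨hs.1, by simpa using hs.2.1⟩)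
    (by intro j hj
        simp only [List.length_replicate] at hj
        rw [hrep j (by omega), hrep (j+1) (by omega)]
        omega)
    (by intro i hi
        simp only [List.length_replicate] at hi
        rw [hrep i hi])
  refine ⟨by simpa using hl, ?_⟩
  intro i hi
  rw [hg i (by simpa using hi), hrep i hi]

lemma foldl_fwd (d : Int) (l : List Int) : ∀ (c : Int) (acc : List Int),
    l.foldl (fun st v => let c' := stepB d st.1 v; (c', st.2 ++ [c'])) (c, acc) =
      (l.foldl (stepB d) c, acc ++ outF d c l) := by
  induction l with
  | nil => intro c acc; simp [outF]
  | cons v t ih =>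
    intro c acc
    simp only [List.foldl_cons, outF, ih, List.append_assoc, List.cons_append, List.nil_append]

lemma foldl_bwd (d : Int) (L : List (Int × Int)) : ∀ (c : Int) (acc : List Int),
    L.foldl (fun st p => let c' := stepB d st.1 p.1; (c', st.2 ++ [min c' p.2])) (c, acc) =
      ((L.map Prod.fst).foldl (stepB d) c, acc ++ outB d c L) := by
  induction L with
  | nil => intro c acc; simp [outB]
  | cons p t ih =>
    intro c acc
    simp only [List.foldl_cons, outB, ih, List.map_cons, List.append_assoc, List.cons_append,
      List.nil_append]

lemma outF_length (d : Int) (l : List Int) : ∀ c, (outF d c l).length = l.length := by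
  induction l with
  | nil => intro c; rfl
  | cons v t ih => intro c; simp [outF, ih]

lemma outB_length (d : Int) (L : List (Int × Int)) : ∀ c, (outB d c L).length = L.length := by
  induction L with
  | nil => intro c; rfl
  | cons p t ih => intro c; simp [outB, ih]

lemma outF_getD (d : Int) (l : List Int) : ∀ (c : Int) (i : Nat), i < l.length →
    (outF d c l).getD i 0 = (l.take (i+1)).foldl (stepB d) c := by
  induction l with
  | nil => intro c i h; simp at h
  | cons v t ih =>
    intro c i h
    cases i with
    | zero => simp [outF]
    | succ i =>
      simp only [outF, List.getD_cons_succ, List.take_succ_cons, List.foldl_cons]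
      exact ih (stepB d c v) i (by simpa using h)

lemma outB_getD (d : Int) (L : List (Int × Int)) : ∀ (c : Int) (k : Nat), k < L.length →
    (outB d c L).getD k 0 =
      min (((L.take (k+1)).map Prod.fst).foldl (stepB d) c) ((L.getD k (0,0)).2) := by
  induction L with
  | nil => intro c k h; simp at h
  | cons p t ih =>
    intro c k h
    cases k with
    | zero => simp [outB]
    | succ k =>
      simp only [outB, List.getD_cons_succ, List.take_succ_cons, List.map_cons, List.foldl_cons]
      exact ih (stepB d c p.1) k (by simpa using h)

lemma phi_nu (d : Int) (r : List Int) :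
    (r.reverse).foldl (stepB d) d = capN d (nuF r) := by
  rw [List.foldl_reverse]
  induction r with
  | nil => rfl
  | cons v t ih =>
    simp only [List.foldr_cons, ih, nuF]
    split_ifs with hv
    · simp only [hv, capN]
      unfold stepB
      simp only [beq_self_eq_true, if_true]
      split_ifs with h <;> omega
    · cases hnu : nuF t with
      | none =>
        simp only [Option.map_none, capN]
        unfold stepB
        simp only [beq_iff_eq, if_neg hv]
        split_ifs with h <;> omega
      | some k =>
        simp only [Option.map_some, capN]
        unfold stepB
        simp only [beq_iff_eq, if_neg hv]
        have : ((k + 1 : Nat) : Int) = (k : Int) + 1 := by push_cast; ring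
        rw [this]
        split_ifs with h <;> omega

lemma getD_reverse' (l : List Int) (i : Nat) (h : i < l.length) :
    l.reverse.getD i 0 = l.getD (l.length - 1 - i) 0 := by
  rw [List.getD_eq_getElem _ _ (by simpa using h), List.getD_eq_getElem _ _ (by omega),
    List.getElem_reverse]

lemma B_char (spikes : List Int) (d : Int) :
    (distance_field2_alt spikes d).length = spikes.length
    ∧ ∀ i, i < spikes.length → (distance_field2_alt spikes d).getD i 0 = specV spikes d i := by
  unfold distance_field2_alt
  simp only [foldl_fwd, foldl_bwd, List.nil_append]
  set n := spikes.length with hn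
  set fwd := outF d d spikes with hfwd
  have hfwdlen : fwd.length = n := outF_length d spikes d
  set L := spikes.reverse.zip fwd.reverse with hL
  have hLlen : L.length = n := by
    rw [hL, List.length_zip, List.length_reverse, List.length_reverse, hfwdlen, hn, min_self]
  set out := outB d d L with hout
  have houtlen : out.length = n := by rw [hout, outB_length, hLlen]
  constructor
  · simpa using houtlen
  intro i hi
  have hk : n - 1 - i < n := by omega
  rw [getD_reverse' out i (by omega), houtlen]
  rw [outB_getD d L d (n-1-i) (by omega)]
  set k := n - 1 - i with hkdef
  -- first component: the backward sweep over the reversed suffix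
  have htake : (L.take (k+1)).map Prod.fst = (spikes.drop i).reverse := by
    rw [hL, show (spikes.reverse.zip fwd.reverse).take (k+1)
        = (spikes.reverse.take (k+1)).zip (fwd.reverse.take (k+1)) by
      simp [List.zip_eq_zipWith, List.take_zipWith]]
    rw [List.map_fst_zip (by
      simp only [List.length_take, List.length_reverse, hfwdlen, ← hn]; omega)]
    rw [List.take_reverse]
    congr 1
    have h9 : spikes.length - (k + 1) = i := by omega
    rw [h9]
  have hLk : L.getD k (0,0) = (spikes.reverse.getD k 0, fwd.reverse.getD k 0) := by
    rw [List.getD_eq_getElem _ _ (by omega)]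
    simp only [hL, List.getElem_zip]
    rw [List.getD_eq_getElem _ _ (by rw [List.length_reverse, ← hn]; omega),
      List.getD_eq_getElem _ _ (by rw [List.length_reverse, hfwdlen]; omega)]
  have hfwdi : fwd.reverse.getD k 0 = capN d (nuF ((spikes.take (i+1)).reverse)) := by
    rw [getD_reverse' fwd k (by omega), hfwdlen]
    have : n - 1 - k = i := by omega
    rw [this, hfwd, outF_getD d spikes d i (by rw [← hn]; omega)]
    have h2 := phi_nu d ((spikes.take (i+1)).reverse)
    rwa [List.reverse_reverse] at h2
  rw [htake, hLk, phi_nu d (spikes.drop i), hfwdi]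
  unfold specV
  rw [min_comm]

lemma getD_take_rev (spikes : List Int) (i k : Nat) (hi : i < spikes.length) (hk : k ≤ i) :
    ((spikes.take (i+1)).reverse).getD k 0 = spikes.getD (i-k) 0 := by
  have hlen : (spikes.take (i+1)).length = i + 1 := by
    rw [List.length_take]; omega
  rw [getD_reverse' _ k (by omega), hlen]
  have h2 : i + 1 - 1 - k = i - k := by omega
  rw [h2, List.getD_eq_getElem _ _ (by omega), List.getD_eq_getElem _ _ (by omega),
    List.getElem_take]

lemma getD_drop' (spikes : List Int) (i k : Nat) (h : i + k < spikes.length) :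
    (spikes.drop i).getD k 0 = spikes.getD (i+k) 0 := by
  rw [List.getD_eq_getElem _ _ (by rw [List.length_drop]; omega),
    List.getD_eq_getElem _ _ h, List.getElem_drop]

lemma len_take_rev (spikes : List Int) (i : Nat) (hi : i < spikes.length) :
    ((spikes.take (i+1)).reverse).length = i + 1 := by
  rw [List.length_reverse, List.length_take]; omega

lemma bridge (spikes : List Int) (d : Int) (i : Nat) (hi : i < spikes.length) :
    (((PySem.List.enumerate spikes 0).filter (fun p => p.2 == 1)).map (·.1)).foldl
        (fun a s => min a ((((i : Int) - s).natAbs : Int))) d = specV spikes d i := by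
  set S := ((PySem.List.enumerate spikes 0).filter (fun p => p.2 == 1)).map (·.1) with hS
  set g : Int → Int := fun s => ((((i : Int) - s).natAbs : Int)) with hg
  obtain ⟨f1, f2, f3⟩ := foldl_min_facts g S d
  set L := S.foldl (fun x s => min x (g s)) d with hL
  have hcaple : ∀ o, capN d o ≤ d := by
    intro o; cases o <;> simp [capN]
  apply le_antisymm
  · -- L ≤ both caps
    apply le_min
    · cases hnl : nuF ((spikes.take (i+1)).reverse) with
      | none => exact f1
      | some k =>
        obtain ⟨hk1, hk2, _⟩ := nuF_some_spec _ k hnl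
        rw [len_take_rev spikes i hi] at hk1
        rw [getD_take_rev spikes i k hi (by omega)] at hk2
        have hmem : ((i - k : Nat) : Int) ∈ S := by
          rw [hS, mem_spikeIdx]
          refine ⟨by positivity, by simpa using (by omega : i - k < spikes.length), ?_⟩
          simpa using hk2
        have := f2 _ hmem
        have hgv : g ((i - k : Nat) : Int) = (k : Int) := by
          simp only [hg]
          have h5 : ((i - k : Nat) : Int) = (i : Int) - k := by omega
          rw [h5]; omega
        rw [hgv] at this
        simp only [capN]
        omega
    · cases hnl : nuF (spikes.drop i) with
      | none => exact f1
      | some k =>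
        obtain ⟨hk1, hk2, _⟩ := nuF_some_spec _ k hnl
        rw [List.length_drop] at hk1
        rw [getD_drop' spikes i k (by omega)] at hk2
        have hmem : ((i + k : Nat) : Int) ∈ S := by
          rw [hS, mem_spikeIdx]
          refine ⟨by positivity, by simpa using (by omega : i + k < spikes.length), ?_⟩
          simpa using hk2
        have := f2 _ hmem
        have hgv : g ((i + k : Nat) : Int) = (k : Int) := by
          simp only [hg]
          have h5 : ((i + k : Nat) : Int) = (i : Int) + k := by push_cast; ring
          rw [h5]; omega
        rw [hgv] at this
        simp only [capN]
        omega
  · -- specV ≤ L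
    rcases f3 with h | ⟨s, hs, hs2⟩
    · rw [h]
      exact le_trans (min_le_left _ _) (hcaple _)
    · rw [hs2]
      rw [hS, mem_spikeIdx] at hs
      obtain ⟨hs0, hsl, hsv⟩ := hs
      have hgs : g s = ((((i : Int) - (s.toNat : Int)).natAbs : Int)) := by
        simp only [hg, Int.toNat_of_nonneg hs0]
      rcases le_or_gt s.toNat i with hcase | hcase
      · -- spike on the left: the prefix side bounds it
        have hpos : ((spikes.take (i+1)).reverse).getD (i - s.toNat) 0 = 1 := by
          rw [getD_take_rev spikes i (i - s.toNat) hi (by omega)]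
          have : i - (i - s.toNat) = s.toNat := by omega
          rw [this]; exact hsv
        have hne : nuF ((spikes.take (i+1)).reverse) ≠ none := by
          intro hnone
          rw [nuF_none_iff] at hnone
          exact hnone (i - s.toNat) (by rw [len_take_rev spikes i hi]; omega) hpos
        obtain ⟨k, hk⟩ := Option.ne_none_iff_exists'.mp hne
        obtain ⟨hk1, _, hk3⟩ := nuF_some_spec _ k hk
        have hkle : k ≤ i - s.toNat := by
          by_contra hlt
          exact hk3 (i - s.toNat) (by omega) hpos
        calc specV spikes d i ≤ capN d (nuF ((spikes.take (i+1)).reverse)) := min_le_left _ _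
          _ ≤ g s := by
              rw [hk, hgs]
              simp only [capN]
              omega
      · -- spike on the right: the suffix side bounds it
        have hpos : (spikes.drop i).getD (s.toNat - i) 0 = 1 := by
          rw [getD_drop' spikes i (s.toNat - i) (by omega)]
          have : i + (s.toNat - i) = s.toNat := by omega
          rw [this]; exact hsv
        have hne : nuF (spikes.drop i) ≠ none := by
          intro hnone
          rw [nuF_none_iff] at hnone
          exact hnone (s.toNat - i) (by rw [List.length_drop]; omega) hpos
        obtain ⟨k, hk⟩ := Option.ne_none_iff_exists'.mp hne
        obtain ⟨hk1, _, hk3⟩ := nuF_some_spec _ k hk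
        have hkle : k ≤ s.toNat - i := by
          by_contra hlt
          exact hk3 (s.toNat - i) (by omega) hpos
        calc specV spikes d i ≤ capN d (nuF (spikes.drop i)) := min_le_right _ _
          _ ≤ g s := by
              rw [hk, hgs]
              simp only [capN]
              omega

-- ===== VERDICT (by name: the statement is the Claim_ definition above) =====
theorem distance_field2_spec : Claim_equal_distance_field2 := by
  intro spikes d _ _
  unfold Spec_distance_field2
  obtain ⟨hAl, hAg⟩ := A_char spikes d
  obtain ⟨hBl, hBg⟩ := B_char spikes d
  apply List.ext_getElem (by rw [hAl, hBl])
  intro i hi1 hi2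
  have hi : i < spikes.length := by rwa [hAl] at hi1
  have e1 : (distance_field2 spikes d)[i] = (distance_field2 spikes d).getD i 0 := by
    rw [List.getD_eq_getElem?_getD, List.getElem?_eq_getElem hi1]; rfl
  have e2 : (distance_field2_alt spikes d)[i] = (distance_field2_alt spikes d).getD i 0 := by
    rw [List.getD_eq_getElem?_getD, List.getElem?_eq_getElem hi2]; rfl
  rw [e1, e2, hAg i hi, hBg i hi, bridge spikes d i hi]
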